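-- pv_equiv track=rewrite | github.com/ejfn/advent-of-code | 2020/21/day21.py | determine_allergens
-- ===== SOURCE A (Python) =====
-- from typing import Dict, List, Set, Tuple
--
-- Food = Tuple[Set[str], Set[str]]
--
-- def determine_allergens(foods: List[Food]) -> Tuple[Dict[str, Set[str]], Set[str]]:
--     allergen_candidates: Dict[str, Set[str]] = {}
--     for ingredients, allergens in foods:
--         for allergen in allergens:
--             if allergen in allergen_candidates:
--                 allergen_candidates[allergen] &= ingredients
--             else:
--                 allergen_candidates[allergen] = set(ingredients)
--     possible_with_allergens = set().union(*allergen_candidates.values()) if allergen_candidates else set()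
--     return allergen_candidates, possible_with_allergens
-- ===== SOURCE B (Python) =====
-- def determine_allergens(foods):
--     # Phase 1: index each allergen to the list of ingredient sets of foods mentioning it.
--     index = {}
--     for ingredients, allergens in foods:
--         for allergen in allergens:
--             index.setdefault(allergen, []).append(ingredients)
--     # Phase 2: candidates per allergen = intersection of its ingredient sets.
--     allergen_candidates = {
--         allergen: set.intersection(*(set(s) for s in sets))
--         for allergen, sets in index.items()
--     }
--     # Phase 3: union of all candidate sets.
--     possible_with_allergens = set()
--     for candidates in allergen_candidates.values():
--         possible_with_allergens |= candidates
--     return allergen_candidates, possible_with_allergens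
-- ===== Notes on version B (the rewrite author's own statement) =====
-- stated objective: alternative
-- what changed: A keeps a running per-allergen intersection updated while scanning foods; B first builds an allergen -> list-of-ingredient-sets index, then computes each allergen's candidates by one set.intersection reduction over its list, then unions the candidate sets in a separate pass.
import Mathlib
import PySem

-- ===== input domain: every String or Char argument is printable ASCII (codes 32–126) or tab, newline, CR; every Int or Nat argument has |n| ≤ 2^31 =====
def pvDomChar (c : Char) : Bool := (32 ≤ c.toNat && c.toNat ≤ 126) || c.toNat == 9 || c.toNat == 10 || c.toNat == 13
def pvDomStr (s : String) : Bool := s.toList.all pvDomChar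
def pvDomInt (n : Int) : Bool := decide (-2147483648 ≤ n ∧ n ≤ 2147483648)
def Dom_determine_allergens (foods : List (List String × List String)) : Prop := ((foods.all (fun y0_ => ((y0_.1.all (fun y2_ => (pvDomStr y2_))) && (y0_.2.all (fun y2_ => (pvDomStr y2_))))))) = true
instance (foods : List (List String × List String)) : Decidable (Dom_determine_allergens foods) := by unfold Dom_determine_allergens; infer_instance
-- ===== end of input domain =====

-- B replaces A's single scan with a running per-allergen intersection by a two-phase
-- build-index-then-reduce computation (objective: alternative decomposition, same cost).
-- Python set/dict ITERATION order is not modelled; the ports fix the input list order.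

-- ===== PORT A =====
-- A: one pass over foods; for each allergen either start its candidates as set(ingredients)
-- or intersect the stored candidates with ingredients; then union all values (empty-dict guard).
def determine_allergens (foods : List (List String × List String)) : (List (String × List String)) × List String :=
  let ac : PySem.Dict String (List String) :=
    foods.foldl (fun d food =>
      food.2.foldl (fun d allergen =>
        if d.contains allergen then
          d.insert allergen (PySem.Set.inter (d.getD allergen []) food.1)
        else
          d.insert allergen (PySem.Set.ofList food.1)) d) PySem.Dict.empty
  let possible : List String :=
    if ac.items.isEmpty then ([] : List String)
    else ac.values.foldl (fun acc s => PySem.Set.union acc s) PySem.Set.empty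
  (ac.items, possible)

-- ===== PORT B =====
-- set.intersection(*(set(s) for s in sets)) : the first set, intersected with the others in order
def intersectSets (sets : List (List String)) : List String :=
  match sets with
  | [] => []
  | s :: rest => rest.foldl (fun acc t => PySem.Set.inter acc (PySem.Set.ofList t)) (PySem.Set.ofList s)

def determine_allergens_alt (foods : List (List String × List String)) : (List (String × List String)) × List String :=
  let index : PySem.Dict String (List (List String)) :=
    foods.foldl (fun d food =>
      food.2.foldl (fun d allergen => d.modify allergen [] (fun ls => ls ++ [food.1])) d)
      PySem.Dict.empty
  let ac : PySem.Dict String (List String) :=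
    PySem.Dict.mk (index.items.map (fun p => (p.1, intersectSets p.2)))
  let possible : List String :=
    ac.values.foldl (fun acc s => PySem.Set.union acc s) PySem.Set.empty
  (ac.items, possible)

-- ===== PRECONDITION & SPEC =====
def Spec_determine_allergens (foods : List (List String × List String)) (out : (List (String × List String)) × List String) : Prop := out = determine_allergens_alt foods
instance (foods : List (List String × List String)) (out : (List (String × List String)) × List String) : Decidable (Spec_determine_allergens foods out) := by unfold Spec_determine_allergens; infer_instance

-- ===== CLAIM (what is proved, stated in full; the proofs are below) =====
def Claim_equal_determine_allergens : Prop := ∀ (foods : List (List String × List String)), Dom_determine_allergens foods → Spec_determine_allergens foods (determine_allergens foods)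

-- ===== LEMMAS AND PROOFS =====

-- A's candidate dict is B's index dict with every value list reduced by intersectSets.
def mapInter (d : PySem.Dict String (List (List String))) : PySem.Dict String (List String) :=
  PySem.Dict.mk (d.items.map (fun p => (p.1, intersectSets p.2)))

-- invariant of B's index: every stored list is nonempty
def InvNE (d : PySem.Dict String (List (List String))) : Prop :=
  ∀ p ∈ d.items, p.2 ≠ []

lemma contains_mapInter (d : PySem.Dict String (List (List String))) (a : String) :
    (mapInter d).contains a = d.contains a := by
  simp [mapInter, PySem.Dict.contains, List.any_map, Function.comp_def]

lemma get?_mapInter (d : PySem.Dict String (List (List String))) (a : String) :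
    (mapInter d).get? a = (d.get? a).map intersectSets := by
  simp [mapInter, PySem.Dict.get?, List.find?_map, Function.comp_def]

lemma inter_ofList (x t : List String) :
    PySem.Set.inter x (PySem.Set.ofList t) = PySem.Set.inter x t := by
  unfold PySem.Set.inter
  apply List.filter_congr
  intro y _
  simp [PySem.Set.contains, PySem.Set.mem_ofList]

lemma intersectSets_append (s : List String) (rest : List (List String)) (ing : List String) :
    intersectSets ((s :: rest) ++ [ing]) = PySem.Set.inter (intersectSets (s :: rest)) ing := by
  simp [intersectSets, List.foldl_append, inter_ofList]

lemma step_inv (d : PySem.Dict String (List (List String))) (a : String) (ing : List String)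
    (h : InvNE d) : InvNE (d.modify a [] (fun ls => ls ++ [ing])) := by
  intro p hp
  simp only [PySem.Dict.modify, PySem.Dict.insert] at hp
  split at hp
  · rcases List.mem_map.mp hp with ⟨q, hq, hqe⟩
    by_cases hqa : (q.1 == a) = true
    · rw [if_pos hqa] at hqe; subst hqe; simp
    · rw [if_neg hqa] at hqe; subst hqe; exact h q hq
  · simp only [List.mem_append, List.mem_singleton] at hp
    rcases hp with hp | hp
    · exact h p hp
    · subst hp; simp

lemma step_eq (d : PySem.Dict String (List (List String))) (a : String) (ing : List String)
    (h : InvNE d) :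
    (if (mapInter d).contains a then
        (mapInter d).insert a (PySem.Set.inter ((mapInter d).getD a []) ing)
      else
        (mapInter d).insert a (PySem.Set.ofList ing))
      = mapInter (d.modify a [] (fun ls => ls ++ [ing])) := by
  by_cases hc : d.contains a = true
  · -- already indexed: both sides replace the stored value in place
    obtain ⟨ls, hls⟩ : ∃ ls, d.get? a = some ls := by
      have := PySem.Dict.contains_eq_isSome_get? (d := d) (k := a)
      rw [hc] at this
      exact Option.isSome_iff_exists.mp this.symm
    have hlsne : ls ≠ [] := h (a, ls) (PySem.Dict.mem_items_of_get?_eq_some _ hls)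
    obtain ⟨s, rest, rfl⟩ : ∃ s rest, ls = s :: rest := by
      cases ls with
      | nil => exact absurd rfl hlsne
      | cons s rest => exact ⟨s, rest, rfl⟩
    have hcm : (mapInter d).contains a = true := by rw [contains_mapInter]; exact hc
    have hgD : (mapInter d).getD a [] = intersectSets (s :: rest) := by
      simp [PySem.Dict.getD, get?_mapInter, hls]
    have hdgD : d.getD a [] = s :: rest := by simp [PySem.Dict.getD, hls]
    rw [if_pos hcm, hgD]
    simp only [PySem.Dict.modify, hdgD, PySem.Dict.insert, hcm, hc, if_true]
    refine congrArg PySem.Dict.mk ?_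
    show ((mapInter d).items.map _) = (d.items.map _).map _
    simp only [mapInter, List.map_map]
    apply List.map_congr_left
    intro p _
    by_cases hpa : p.1 = a
    · simp only [← intersectSets_append, Function.comp_apply, hpa, beq_self_eq_true, if_true]
    · simp [hpa]
  · -- fresh allergen: both sides append a new entry
    have hc' : d.contains a = false := by simpa using hc
    have hcm : (mapInter d).contains a = false := by rw [contains_mapInter]; exact hc'
    have hdgD : d.getD a [] = [] :=
      PySem.Dict.getD_of_not_contains d [] hc'
    rw [if_neg (by simp [hcm])]
    simp only [PySem.Dict.modify, hdgD, PySem.Dict.insert, hcm, hc', Bool.false_eq_true,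
      if_false]
    refine congrArg PySem.Dict.mk ?_
    simp [mapInter, intersectSets]

-- inner loop (over one food's allergens), state-generalized
lemma inner_eq (alls : List String) (ing : List String)
    (d : PySem.Dict String (List (List String))) (h : InvNE d) :
    alls.foldl (fun d allergen =>
        if d.contains allergen then
          d.insert allergen (PySem.Set.inter (d.getD allergen []) ing)
        else
          d.insert allergen (PySem.Set.ofList ing)) (mapInter d)
      = mapInter (alls.foldl (fun d allergen => d.modify allergen [] (fun ls => ls ++ [ing])) d)
      ∧ InvNE (alls.foldl (fun d allergen => d.modify allergen [] (fun ls => ls ++ [ing])) d) := by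
  induction alls generalizing d with
  | nil => exact ⟨rfl, h⟩
  | cons a rest ih =>
    simp only [List.foldl_cons]
    rw [step_eq d a ing h]
    exact ih _ (step_inv d a ing h)

-- A's empty-dict guard before the union is redundant: the fold over no values is empty anyway
lemma union_guard (l : List (String × List String)) :
    (if l.isEmpty then ([] : List String)
     else (l.map (fun p => p.2)).foldl (fun acc s => PySem.Set.union acc s) PySem.Set.empty)
    = (l.map (fun p => p.2)).foldl (fun acc s => PySem.Set.union acc s) PySem.Set.empty := by
  cases l <;> rfl

-- outer loop (over foods), state-generalized
lemma outer_eq (foods : List (List String × List String))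
    (d : PySem.Dict String (List (List String))) (h : InvNE d) :
    foods.foldl (fun d food =>
        food.2.foldl (fun d allergen =>
          if d.contains allergen then
            d.insert allergen (PySem.Set.inter (d.getD allergen []) food.1)
          else
            d.insert allergen (PySem.Set.ofList food.1)) d) (mapInter d)
      = mapInter (foods.foldl (fun d food =>
          food.2.foldl (fun d allergen => d.modify allergen [] (fun ls => ls ++ [food.1])) d) d) := by
  induction foods generalizing d with
  | nil => rfl
  | cons f rest ih =>
    simp only [List.foldl_cons]
    obtain ⟨heq, hinv⟩ := inner_eq f.2 f.1 d h
    rw [heq]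
    exact ih _ hinv

-- ===== VERDICT (by name: the statement is the Claim_ definition above) =====
theorem determine_allergens_spec : Claim_equal_determine_allergens := by
  intro foods _
  show determine_allergens foods = determine_allergens_alt foods
  unfold determine_allergens determine_allergens_alt
  have h0 : InvNE PySem.Dict.empty := by intro p hp; simp [PySem.Dict.empty] at hp
  have key := outer_eq foods PySem.Dict.empty h0
  have hme : mapInter PySem.Dict.empty = PySem.Dict.empty := rfl
  rw [hme] at key
  rw [key]
  set idx := foods.foldl (fun d food =>
      food.2.foldl (fun d allergen => d.modify allergen [] (fun ls => ls ++ [food.1])) d)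
      PySem.Dict.empty with hidx
  refine Prod.ext rfl ?_
  exact union_guard (mapInter idx).items
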